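-- pv_equiv track=rewrite | github.com/aszmajdzinski/autonomous-raspberry-car | raspberry/Gui/utils.py | get_n_chars
-- ===== SOURCE A (Python) =====
-- def get_n_chars(text: str, n: int):
--     text_slice = str()
--     for i in range(n):
--         try:
--             text_slice += text[i]
--         except IndexError:
--             text_slice += ' '
--     return text_slice
-- ===== SOURCE B (Python) =====
-- def get_n_chars(text: str, n: int):
--     if n <= 0:
--         return ''
--     return text[:n].ljust(n)
-- ===== Notes on version B (the rewrite author's own statement) =====
-- stated objective: simpler
-- what changed: Replaces the per-character loop with try/except by a closed-form slice-and-pad: text[:n].ljust(n), guarded by n <= 0 returning '' to match A's empty range.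
import Mathlib
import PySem

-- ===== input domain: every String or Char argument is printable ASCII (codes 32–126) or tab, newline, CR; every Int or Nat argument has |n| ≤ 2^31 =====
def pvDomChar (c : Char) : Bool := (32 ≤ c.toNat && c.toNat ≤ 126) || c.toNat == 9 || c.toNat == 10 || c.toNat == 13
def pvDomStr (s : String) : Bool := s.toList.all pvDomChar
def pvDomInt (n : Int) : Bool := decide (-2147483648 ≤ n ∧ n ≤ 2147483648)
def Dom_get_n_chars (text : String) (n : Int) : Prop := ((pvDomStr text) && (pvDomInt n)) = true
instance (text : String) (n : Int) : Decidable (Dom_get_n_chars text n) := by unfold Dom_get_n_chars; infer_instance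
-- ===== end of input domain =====

-- B replaces A's per-character loop with try/except by a closed-form slice-and-pad (simpler).


-- ===== PORT A =====
-- for i in range(n): try text[i] except IndexError -> ' ' ; accumulate into text_slice
def get_n_chars (text : String) (n : Int) : String :=
  String.ofList ((PySem.List.pyRange 0 n 1).foldl (fun acc i =>
    match PySem.List.pyGet? text.toList i with
    | some c => acc ++ [c]
    | none   => acc ++ [' ']) [])

-- ===== PORT B =====
-- if n <= 0: '' ; else text[:n].ljust(n)
def get_n_chars_alt (text : String) (n : Int) : String :=
  if n ≤ 0 then "" else
    let t := PySem.List.slice text.toList none (some n)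
    String.ofList (t ++ List.replicate (n.toNat - t.length) ' ')

-- ===== PRECONDITION & SPEC =====
def Spec_get_n_chars (text : String) (n : Int) (out : String) : Prop := out = get_n_chars_alt text n
instance (text : String) (n : Int) (out : String) : Decidable (Spec_get_n_chars text n out) := by unfold Spec_get_n_chars; infer_instance

-- ===== CLAIM (what is proved, stated in full; the proofs are below) =====
def Claim_equal_get_n_chars : Prop := ∀ (text : String) (n : Int), Dom_get_n_chars text n → Spec_get_n_chars text n (get_n_chars text n)

-- ===== LEMMAS AND PROOFS =====

-- the Nat-indexed closed form of A's loop body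
lemma map_getD_range_eq_take_pad (cs : List Char) (m : Nat) :
    (List.range m).map (fun k => cs.getD k ' ') =
      cs.take m ++ List.replicate (m - cs.length) ' ' := by
  induction m with
  | zero => simp
  | succ m ih =>
    rw [List.range_succ, List.map_append, ih]
    by_cases h : m < cs.length
    · rw [Nat.sub_eq_zero_of_le (Nat.le_of_lt h),
        Nat.sub_eq_zero_of_le (Nat.succ_le_of_lt h),
        List.take_add_one, List.getElem?_eq_getElem h]
      simp [List.getD, List.getElem?_eq_getElem h]
    · rw [not_lt] at h
      have h1 : cs.take m = cs := List.take_of_length_le h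
      have h2 : cs.take (m+1) = cs := List.take_of_length_le (Nat.le_succ_of_le h)
      have h3 : m + 1 - cs.length = (m - cs.length) + 1 := by omega
      rw [h1, h2, h3, List.replicate_succ' (n := m - cs.length)]
      simp [List.getD, List.getElem?_eq_none_iff.mpr h]

theorem get_n_chars_spec : Claim_equal_get_n_chars := by
  intro text n _
  unfold Spec_get_n_chars get_n_chars get_n_chars_alt
  by_cases hn : n ≤ 0
  · rw [PySem.List.pyRange_one_eq_nil hn]
    simp [hn]
  · rw [not_le] at hn
    simp only [if_neg (not_le.mpr hn)]
    have hfun : (fun (acc : List Char) (i : Int) =>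
        match PySem.List.pyGet? text.toList i with
        | some c => acc ++ [c]
        | none   => acc ++ [' ']) =
        (fun acc i => acc ++ [PySem.List.pyGetD text.toList i ' ']) := by
      funext acc i
      unfold PySem.List.pyGetD
      cases PySem.List.pyGet? text.toList i <;> rfl
    rw [hfun, PySem.List.foldl_append_singleton_eq_map,
      PySem.List.pyRange_one 0 n,
      PySem.List.slice_to _ (le_of_lt hn)]
    simp only [List.nil_append, List.map_map, Int.sub_zero, List.length_take]
    have hmin : n.toNat - min n.toNat text.toList.length = n.toNat - text.toList.length := by
      omega
    rw [hmin]
    congr 1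
    rw [← map_getD_range_eq_take_pad]
    apply List.map_congr_left
    intro k _
    simp [PySem.List.pyGetD_natCast]
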